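-- pv_equiv track=rewrite | github.com/margotrud/my-shopping-assistant | Chatbot/extractors/color/logic/color_categorizer.py | build_tone_modifier_mappings
-- ===== SOURCE A (Python) =====
-- from typing import List, Set, Dict, Tuple
-- from collections import defaultdict
--
-- def build_tone_modifier_mappings(
--     phrases: List[str],
--     known_tones: Set[str],
--     known_modifiers: Set[str]
-- ) -> Tuple[Set[str], Set[str], Dict[str, Set[str]], Dict[str, Set[str]]]:
--     """
--     Extracts tone-modifier relationships from a list of color phrases.
--
--     For each phrase like 'soft pink' or 'vibrant red', this function:
--     - Identifies known tone and modifier tokens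
--     - Records bidirectional links between tones and modifiers
--     - Returns:
--         - Unique tones and modifiers
--         - Mapping from modifier → associated tones
--         - Mapping from tone → associated modifiers
--
--     Args:
--         phrases (List[str]): Descriptive color phrases (e.g., ['soft pink']).
--         known_tones (Set[str]): Valid tone names.
--         known_modifiers (Set[str]): Recognized modifier tokens.
--
--     Returns:
--         Tuple:
--             Set[str]: All tones found in input.
--             Set[str]: All modifiers found in input.
--             Dict[str, Set[str]]: modifier → tones
--             Dict[str, Set[str]]: tone → modifiers
--     """
--     tones = set()
--     modifiers = set()
--     modifier_to_tone = defaultdict(set)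
--     tone_to_modifier = defaultdict(set)
--
--     for phrase in phrases:
--         tokens = phrase.lower().split()
--         matched_tones = [t for t in tokens if t in known_tones]
--         matched_modifiers = [t for t in tokens if t in known_modifiers]
--
--         tones.update(matched_tones)
--         modifiers.update(matched_modifiers)
--
--         for mod in matched_modifiers:
--             for tone in matched_tones:
--                 modifier_to_tone[mod].add(tone)
--                 tone_to_modifier[tone].add(mod)
--
--     return tones, modifiers, modifier_to_tone, tone_to_modifier
-- ===== SOURCE B (Python) =====
-- from collections import defaultdict
-- from itertools import groupby
--
-- def build_tone_modifier_mappings(phrases, known_tones, known_modifiers):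
--     # Declarative pipeline: tokenize once, extract flat occurrence/edge sequences,
--     # then build each mapping by sort-by-first-occurrence-rank + groupby
--     # (stable sort puts each key's edges adjacent, in first-occurrence key order).
--     tokenized = [phrase.lower().split() for phrase in phrases]
--     tone_seq = [t for toks in tokenized for t in toks if t in known_tones]
--     mod_seq = [t for toks in tokenized for t in toks if t in known_modifiers]
--     edges = [(m, t) for toks in tokenized
--              for m in toks if m in known_modifiers
--              for t in toks if t in known_tones]
--
--     def grouped(pairs):
--         rank = {k: i for i, k in enumerate(dict.fromkeys(k for k, _ in pairs))}
--         ordered = sorted(pairs, key=lambda e: rank[e[0]])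
--         return defaultdict(set, {k: {v for _, v in run}
--                                  for k, run in groupby(ordered, key=lambda e: e[0])})
--
--     return (set(tone_seq), set(mod_seq), grouped(edges),
--             grouped([(t, m) for m, t in edges]))
-- ===== Notes on version B (the rewrite author's own statement) =====
-- stated objective: alternative
-- what changed: B replaces A's single imperative pass that mutates two defaultdicts inside a doubled nested loop by a declarative pipeline: tokenize all phrases once, extract flat tone/modifier/edge occurrence sequences, then build each mapping by stable-sorting the edge list on a first-occurrence rank and grouping adjacent runs with itertools.groupby (the second mapping is derived from the swapped edge list).
import Mathlib
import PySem

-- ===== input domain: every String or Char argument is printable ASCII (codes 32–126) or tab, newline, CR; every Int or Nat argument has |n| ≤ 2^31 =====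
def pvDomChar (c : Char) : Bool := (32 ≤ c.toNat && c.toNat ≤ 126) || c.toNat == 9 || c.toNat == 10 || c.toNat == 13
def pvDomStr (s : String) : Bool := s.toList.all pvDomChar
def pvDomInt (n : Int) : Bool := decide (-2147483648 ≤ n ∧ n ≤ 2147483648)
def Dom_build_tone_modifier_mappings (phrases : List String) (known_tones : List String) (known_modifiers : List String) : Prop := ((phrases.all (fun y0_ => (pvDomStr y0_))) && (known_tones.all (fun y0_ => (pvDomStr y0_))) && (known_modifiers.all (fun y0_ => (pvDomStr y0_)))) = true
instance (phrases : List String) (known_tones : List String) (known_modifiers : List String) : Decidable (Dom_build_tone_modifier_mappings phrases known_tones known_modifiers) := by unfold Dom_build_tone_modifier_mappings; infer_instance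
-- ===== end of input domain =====

-- B replaces A's mutating single pass by a declarative pipeline: flat occurrence/edge
-- sequences extracted once, then each mapping built by sort-by-first-occurrence-rank
-- plus groupby over adjacent runs (objective: alternative).
-- ===== PORT A =====
def btmA_step (known_tones known_modifiers : List String)
    (st : PySem.Set String × PySem.Set String × PySem.Dict String (PySem.Set String) × PySem.Dict String (PySem.Set String))
    (phrase : String) :
    PySem.Set String × PySem.Set String × PySem.Dict String (PySem.Set String) × PySem.Dict String (PySem.Set String) :=
  let tokens := PySem.Str.split₀ (PySem.Str.lower phrase)
  let matched_tones := tokens.filter (fun t => known_tones.contains t)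
  let matched_modifiers := tokens.filter (fun t => known_modifiers.contains t)
  let dicts := matched_modifiers.foldl (fun p mod =>
      matched_tones.foldl (fun p tone =>
        (p.1.modify mod [] (fun s => PySem.Set.add s tone),
         p.2.modify tone [] (fun s => PySem.Set.add s mod))) p) (st.2.2.1, st.2.2.2)
  (PySem.Set.update st.1 matched_tones, PySem.Set.update st.2.1 matched_modifiers, dicts.1, dicts.2)

def build_tone_modifier_mappings (phrases : List String) (known_tones : List String) (known_modifiers : List String) : List String × List String × (List (String × List String)) × (List (String × List String)) :=
  let fin := phrases.foldl (btmA_step known_tones known_modifiers)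
    (PySem.Set.empty, PySem.Set.empty, PySem.Dict.empty, PySem.Dict.empty)
  (fin.1, fin.2.1, fin.2.2.1.items, fin.2.2.2.items)

-- ===== PORT B =====
-- Source B's pipeline, step for step: tokenized, three flat comprehensions, then
-- grouped(pairs) = rank dict from enumerate(dict.fromkeys(firsts)), stable sort
-- by the rank of the first component, and itertools.groupby over adjacent runs.
def btmB_tokenized (phrases : List String) : List (List String) :=
  phrases.map (fun phrase => PySem.Str.split₀ (PySem.Str.lower phrase))

def btmB_edges (tokenized : List (List String)) (known_tones known_modifiers : List String) : List (String × String) :=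
  tokenized.flatMap (fun toks =>
    (toks.filter (fun m => known_modifiers.contains m)).flatMap (fun m =>
      (toks.filter (fun t => known_tones.contains t)).map (fun t => (m, t))))

-- rank = {k: i for i, k in enumerate(dict.fromkeys(k for k, _ in pairs))}
def btmB_rank (pairs : List (String × String)) : PySem.Dict String Int :=
  PySem.Dict.ofList ((PySem.List.enumerate (PySem.List.dedup (pairs.map (fun e => e.1)))).map (fun p => (p.2, p.1)))

-- itertools.groupby(·, key=lambda e: e[0]) with the runs' values projected to e[1]
def btmB_runs : List (String × String) → List (String × List String)
  | [] => []
  | (m, t) :: es =>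
    match btmB_runs es with
    | [] => [(m, [t])]
    | (m', ts) :: rest =>
      if m = m' then (m, t :: ts) :: rest else (m, [t]) :: (m', ts) :: rest

-- grouped(pairs): sorted(pairs, key=lambda e: rank[e[0]]) then groupby; rank[e[0]]
-- is ported as getD with default 0 — every first component is a key of rank, so
-- the default is never consulted (Python's rank[...] cannot raise here).
def btmB_grouped (pairs : List (String × String)) : List (String × List String) :=
  (btmB_runs (PySem.List.sorted pairs (fun e => (btmB_rank pairs).getD e.1 0) false)).map
    (fun p => (p.1, PySem.Set.ofList p.2))

def build_tone_modifier_mappings_alt (phrases : List String) (known_tones : List String) (known_modifiers : List String) : List String × List String × (List (String × List String)) × (List (String × List String)) :=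
  let tokenized := btmB_tokenized phrases
  let tone_seq := tokenized.flatMap (fun toks => toks.filter (fun t => known_tones.contains t))
  let mod_seq := tokenized.flatMap (fun toks => toks.filter (fun t => known_modifiers.contains t))
  let edges := btmB_edges tokenized known_tones known_modifiers
  (PySem.Set.ofList tone_seq, PySem.Set.ofList mod_seq,
   btmB_grouped edges, btmB_grouped (edges.map (fun e => (e.2, e.1))))

-- ===== PRECONDITION & SPEC =====
def Spec_build_tone_modifier_mappings (phrases : List String) (known_tones : List String) (known_modifiers : List String) (out : List String × List String × (List (String × List String)) × (List (String × List String))) : Prop := out = build_tone_modifier_mappings_alt phrases known_tones known_modifiers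
instance (phrases : List String) (known_tones : List String) (known_modifiers : List String) (out : List String × List String × (List (String × List String)) × (List (String × List String))) : Decidable (Spec_build_tone_modifier_mappings phrases known_tones known_modifiers out) := by unfold Spec_build_tone_modifier_mappings; infer_instance

-- ===== CLAIM (what is proved, stated in full; the proofs are below) =====
def Claim_equal_build_tone_modifier_mappings : Prop := ∀ (phrases : List String) (known_tones : List String) (known_modifiers : List String), Dom_build_tone_modifier_mappings phrases known_tones known_modifiers → Spec_build_tone_modifier_mappings phrases known_tones known_modifiers (build_tone_modifier_mappings phrases known_tones known_modifiers)

-- ===== LEMMAS AND PROOFS =====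

-- proof-side canonical forms
def btmKeys (es : List (String × String)) : List String :=
  PySem.List.dedup (es.map (fun e => e.1))

def btmFilt (es : List (String × String)) (k : String) : List (String × String) :=
  es.filter (fun e => e.1 == k)

def btmCanon (es : List (String × String)) : List (String × String) :=
  (btmKeys es).flatMap (btmFilt es)

-- ---- A-side: the whole fold in terms of the flat sequences ----
theorem btm_fold_edges (d1 d2 : PySem.Dict String (PySem.Set String))
    (mm mt : List String) :
    mm.foldl (fun p mod =>
      mt.foldl (fun p tone =>
        (PySem.Dict.modify p.1 mod [] (fun s => PySem.Set.add s tone),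
         PySem.Dict.modify p.2 tone [] (fun s => PySem.Set.add s mod))) p) (d1, d2) =
    ((mm.flatMap (fun m => mt.map (fun t => (m, t)))).foldl
        (fun d e => d.modify e.1 [] (fun s => PySem.Set.add s e.2)) d1,
     (mm.flatMap (fun m => mt.map (fun t => (m, t)))).foldl
        (fun d e => d.modify e.2 [] (fun s => PySem.Set.add s e.1)) d2) := by
  induction mm generalizing d1 d2 with
  | nil => simp
  | cons m ms ih =>
    simp only [List.flatMap_cons, List.foldl_cons, List.foldl_append, List.foldl_map]
    rw [PySem.List.foldl_prod_mk
      (f := fun d tone => PySem.Dict.modify d m [] (fun s => PySem.Set.add s tone))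
      (g := fun d tone => PySem.Dict.modify d tone [] (fun s => PySem.Set.add s m))]
    rw [ih]

theorem btmA_fold_flat (kt km : List String) (phrases : List String)
    (T M : PySem.Set String) (d1 d2 : PySem.Dict String (PySem.Set String)) :
    phrases.foldl (btmA_step kt km) (T, M, d1, d2) =
      (PySem.Set.update T ((btmB_tokenized phrases).flatMap (fun toks => toks.filter (fun t => kt.contains t))),
       PySem.Set.update M ((btmB_tokenized phrases).flatMap (fun toks => toks.filter (fun t => km.contains t))),
       (btmB_edges (btmB_tokenized phrases) kt km).foldl
         (fun d e => d.modify e.1 [] (fun s => PySem.Set.add s e.2)) d1,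
       (btmB_edges (btmB_tokenized phrases) kt km).foldl
         (fun d e => d.modify e.2 [] (fun s => PySem.Set.add s e.1)) d2) := by
  induction phrases generalizing T M d1 d2 with
  | nil => simp [btmB_tokenized, btmB_edges, PySem.Set.update]
  | cons p ps ih =>
    simp only [List.foldl_cons, btmA_step]
    rw [btm_fold_edges, ih]
    simp [btmB_tokenized, btmB_edges, PySem.Set.update, List.foldl_append]

-- value of A's grouping fold at any key
theorem btm_getD_fold (edges : List (String × String)) (d : PySem.Dict String (PySem.Set String)) (k : String) :
    (edges.foldl (fun d e => d.modify e.1 [] (fun s => PySem.Set.add s e.2)) d).getD k [] =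
      PySem.Set.update (d.getD k []) ((edges.filter (fun e => e.1 == k)).map (fun e => e.2)) := by
  induction edges generalizing d with
  | nil => simp [PySem.Set.update]
  | cons e es ih =>
    simp only [List.foldl_cons, List.filter_cons]
    by_cases h : e.1 = k
    · subst h
      simp [ih, PySem.Dict.getD_modify_self, PySem.Set.update]
    · rw [ih]
      have hne : (e.1 == k) = false := by simp [h]
      simp [hne, PySem.Dict.getD_modify, Ne.symm h]

-- A's grouping fold from empty has exactly the canonical group-by as its items
theorem btm_items_fold (edges : List (String × String)) :
    (edges.foldl (fun d e => d.modify e.1 [] (fun s => PySem.Set.add s e.2))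
      (PySem.Dict.empty : PySem.Dict String (PySem.Set String))).items =
      (btmKeys edges).map (fun k => (k, PySem.Set.ofList ((btmFilt edges k).map (fun e => e.2)))) := by
  have hkeys : (edges.foldl (fun d e => d.modify e.1 [] (fun s => PySem.Set.add s e.2))
      (PySem.Dict.empty : PySem.Dict String (PySem.Set String))).keys =
      PySem.Set.ofList (edges.map (fun e => e.1)) := by
    rw [PySem.Dict.keys_foldl_modify_key (key := fun e : String × String => e.1)
      (f := fun _ e => fun s => PySem.Set.add s e.2)]
    simp [PySem.Set.update, PySem.Set.ofList_eq_foldl]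
  have hnd : (edges.foldl (fun d e => d.modify e.1 [] (fun s => PySem.Set.add s e.2))
      (PySem.Dict.empty : PySem.Dict String (PySem.Set String))).keys.Nodup := by
    rw [hkeys]; exact PySem.Set.nodup_ofList _
  rw [PySem.Dict.items_eq_map_keys _ hnd [], hkeys]
  have hk : PySem.Set.ofList (edges.map (fun e => e.1)) = btmKeys edges := by
    simp [btmKeys, PySem.List.dedup]
  rw [hk]
  refine List.map_congr_left (fun k _ => ?_)
  rw [btm_getD_fold]
  simp [btmFilt, PySem.Set.update, PySem.Set.ofList_eq_foldl, PySem.Dict.getD_empty]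

-- the second dict's fold is the first one over the swapped edges
theorem btm_swap_fold (edges : List (String × String)) (d : PySem.Dict String (PySem.Set String)) :
    edges.foldl (fun d e => d.modify e.2 [] (fun s => PySem.Set.add s e.1)) d =
      (edges.map (fun e => (e.2, e.1))).foldl
        (fun d e => d.modify e.1 [] (fun s => PySem.Set.add s e.2)) d := by
  rw [List.foldl_map]

-- ---- dedup of a longer list extends dedup of its prefix ----
theorem btm_set_update_exists (l s : List String) :
    ∃ t, PySem.Set.update s l = s ++ t ∧ ∀ x ∈ t, x ∉ s := by
  induction l generalizing s with
  | nil => exact ⟨[], by simp [PySem.Set.update], by simp⟩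
  | cons x l ih =>
    have hstep : PySem.Set.update s (x :: l) = PySem.Set.update (PySem.Set.add s x) l := by
      simp [PySem.Set.update]
    by_cases hx : x ∈ s
    · rw [hstep, PySem.Set.add_of_mem hx]; exact ih s
    · rw [hstep, PySem.Set.add_of_not_mem hx]
      obtain ⟨t, ht, hdisj⟩ := ih (s ++ [x])
      refine ⟨x :: t, by simpa [List.append_assoc] using ht, ?_⟩
      intro y hy
      rcases List.mem_cons.mp hy with rfl | hy
      · exact hx
      · intro hys; exact hdisj y hy (by simp [hys])

theorem btm_keys_append (es ys : List (String × String)) :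
    ∃ t, btmKeys (es ++ ys) = btmKeys es ++ t ∧ ∀ x ∈ t, x ∉ btmKeys es := by
  have h1 : btmKeys (es ++ ys) = PySem.Set.update (btmKeys es) (ys.map (fun e => e.1)) := by
    simp [btmKeys, PySem.List.dedup, PySem.Set.ofList, PySem.Set.update, List.foldl_append]
  rw [h1]
  exact btm_set_update_exists _ _

-- ---- rank characterization ----
theorem btm_enum_mem (l : List String) (s : Int) (i : Nat) (h : i < l.length) :
    ((s + (i : Int)), l[i]) ∈ PySem.List.enumerate l s := by
  induction l generalizing s i with
  | nil => simp at h
  | cons x xs ih =>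
    rw [PySem.List.enumerate_cons]
    cases i with
    | zero => simp
    | succ j =>
      refine List.mem_cons_of_mem _ ?_
      have hj : j < xs.length := by simpa using h
      have := ih (s + 1) j hj
      have harith : s + 1 + (j : Int) = s + ((j : Nat) + 1 : Nat) := by push_cast; ring
      simpa [harith] using this

theorem btm_runs_cons (m t : String) (es : List (String × String)) :
    btmB_runs ((m, t) :: es) =
      match btmB_runs es with
      | [] => [(m, [t])]
      | (m', ts) :: rest =>
        if m = m' then (m, t :: ts) :: rest else (m, [t]) :: (m', ts) :: rest := rfl

theorem btm_rank_getD (pairs : List (String × String)) (k : String) (hk : k ∈ btmKeys pairs) :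
    (btmB_rank pairs).getD k 0 = ((List.idxOf k (btmKeys pairs)) : Int) := by
  have hfold : btmB_rank pairs =
      ((PySem.List.enumerate (btmKeys pairs) 0).map (fun p => (p.2, p.1))).foldl
        (fun d a => d.insert a.1 a.2) PySem.Dict.empty := rfl
  have hfst : ((PySem.List.enumerate (btmKeys pairs) 0).map (fun p => (p.2, p.1))).map (fun a => a.1)
      = btmKeys pairs := by
    rw [List.map_map]
    exact PySem.List.map_snd_enumerate _ _
  have hndL : (((PySem.List.enumerate (btmKeys pairs) 0).map (fun p => (p.2, p.1))).map (fun a => a.1)).Nodup := by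
    rw [hfst]
    simpa [btmKeys, PySem.List.dedup] using PySem.Set.nodup_ofList (pairs.map (fun e => e.1))
  have hitems : (btmB_rank pairs).items =
      (PySem.List.enumerate (btmKeys pairs) 0).map (fun p => (p.2, p.1)) := by
    rw [hfold]
    rw [PySem.Dict.items_foldl_insert_fresh
      ((PySem.List.enumerate (btmKeys pairs) 0).map (fun p => (p.2, p.1)))
      (fun a : String × Int => a.1) (fun a : String × Int => a.2) PySem.Dict.empty
      (by intro a _; exact PySem.Dict.contains_empty _) hndL]
    simp [PySem.Dict.empty]
  have hndK : (btmB_rank pairs).keys.Nodup := by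
    have hkeq : (btmB_rank pairs).keys =
        ((PySem.List.enumerate (btmKeys pairs) 0).map (fun p => (p.2, p.1))).map (fun a => a.1) := by
      simp [PySem.Dict.keys, hitems]
    rw [hkeq]; exact hndL
  have hlt : List.idxOf k (btmKeys pairs) < (btmKeys pairs).length := List.idxOf_lt_length_of_mem hk
  have hmem : (k, ((List.idxOf k (btmKeys pairs) : Nat) : Int)) ∈
      (PySem.List.enumerate (btmKeys pairs) 0).map (fun p => (p.2, p.1)) := by
    have hin := btm_enum_mem (btmKeys pairs) 0 (List.idxOf k (btmKeys pairs)) hlt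
    have hgk : (btmKeys pairs)[List.idxOf k (btmKeys pairs)] = k := List.getElem_idxOf hlt
    have hin' : (((List.idxOf k (btmKeys pairs) : Nat) : Int), k) ∈
        PySem.List.enumerate (btmKeys pairs) 0 := by simpa [hgk] using hin
    simpa using List.mem_map_of_mem (f := fun p : Int × String => (p.2, p.1)) hin'
  exact PySem.Dict.getD_of_mem_items _ (hitems.symm ▸ hmem) hndK 0

-- ---- insertBy placement ----
theorem btm_insertBy_skip (before : (String × String) → (String × String) → Bool)
    (x : String × String) (ys zs : List (String × String))
    (h : ∀ y ∈ ys, before x y = false) :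
    PySem.List.insertBy before x (ys ++ zs) = ys ++ PySem.List.insertBy before x zs := by
  induction ys with
  | nil => simp
  | cons y ys ih =>
    have hy : before x y = false := h y (by simp)
    rw [List.cons_append,
      show PySem.List.insertBy before x (y :: (ys ++ zs)) =
        if before x y then x :: y :: (ys ++ zs) else y :: PySem.List.insertBy before x (ys ++ zs) from by
          simp [PySem.List.insertBy]]
    simp [hy, ih (fun y hy => h y (by simp [hy]))]

theorem btm_insertBy_front (before : (String × String) → (String × String) → Bool)
    (x : String × String) (ys : List (String × String))
    (h : ∀ y ∈ ys, before x y = true) :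
    PySem.List.insertBy before x ys = x :: ys := by
  cases ys with
  | nil => simp [PySem.List.insertBy]
  | cons y ys => simp [PySem.List.insertBy, h y (by simp)]

-- ---- runs / groupby over a canonical concatenation of groups ----
theorem btm_runs_head (l : List (String × String)) (h : l ≠ []) :
    ∃ ts rest, btmB_runs l = ((l.head h).1, ts) :: rest := by
  cases l with
  | nil => exact absurd rfl h
  | cons e l' =>
    obtain ⟨m, t⟩ := e
    show ∃ ts rest, btmB_runs ((m, t) :: l') = (m, ts) :: rest
    simp only [btmB_runs]
    cases hr : btmB_runs l' with
    | nil => exact ⟨[t], [], rfl⟩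
    | cons p rest =>
      obtain ⟨m', ts⟩ := p
      by_cases hmm : m = m'
      · subst hmm; exact ⟨t :: ts, rest, by simp⟩
      · exact ⟨[t], (m', ts) :: rest, by simp [hmm]⟩

theorem btm_runs_group (G L : List (String × String)) (k : String) (hG : G ≠ [])
    (hall : ∀ e ∈ G, e.1 = k) (hL : ∀ (h : L ≠ []), (L.head h).1 ≠ k) :
    btmB_runs (G ++ L) = (k, G.map (fun e => e.2)) :: btmB_runs L := by
  induction G with
  | nil => exact absurd rfl hG
  | cons e G' ih =>
    obtain ⟨m, t⟩ := e
    have hm : m = k := hall (m, t) (by simp)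
    cases G' with
    | nil =>
      cases L with
      | nil => simp [btmB_runs, hm]
      | cons l L' =>
        obtain ⟨ts, rest, hr⟩ := btm_runs_head (l :: L') (by simp)
        simp only [List.head_cons] at hr
        have hne : l.1 ≠ k := by simpa using hL (by simp)
        have hcond : ¬ (m = l.1) := by rw [hm]; exact fun hh => hne hh.symm
        have hstep : btmB_runs ((m, t) :: (l :: L')) = (m, [t]) :: btmB_runs (l :: L') := by
          rw [btm_runs_cons, hr]
          simp [hcond]
        simpa [hm] using hstep
    | cons e2 G'' =>
      have hih := ih (by simp) (fun e he => hall e (by simp [he]))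
      have hstep : btmB_runs ((m, t) :: ((e2 :: G'') ++ L)) =
          (k, t :: (e2 :: G'').map (fun e => e.2)) :: btmB_runs L := by
        rw [btm_runs_cons, hih]
        simp [hm]
      simpa [hm] using hstep

theorem btm_runs_flatMap (es : List (String × String)) (ks : List String) (hnd : ks.Nodup)
    (hne : ∀ k ∈ ks, btmFilt es k ≠ []) :
    btmB_runs (ks.flatMap (btmFilt es)) = ks.map (fun k => (k, (btmFilt es k).map (fun e => e.2))) := by
  induction ks with
  | nil => simp [btmB_runs]
  | cons k ks ih =>
    rw [List.flatMap_cons]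
    rw [btm_runs_group (btmFilt es k) (ks.flatMap (btmFilt es)) k (hne k (by simp))
      (by intro e he; simpa [btmFilt] using (List.mem_filter.mp he).2)
      (by
        intro h
        have hmem := List.head_mem h
        obtain ⟨k', hk', he⟩ := List.mem_flatMap.mp hmem
        have h1 : ((ks.flatMap (btmFilt es)).head h).1 = k' := by
          simpa [btmFilt] using (List.mem_filter.mp he).2
        rw [h1]
        intro hkk; subst hkk
        exact (List.nodup_cons.mp hnd).1 hk')]
    rw [ih (List.nodup_cons.mp hnd).2 (fun k hk => hne k (by simp [hk]))]
    simp

-- ---- membership in the canonical form ----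
theorem btm_mem_keys (es : List (String × String)) (e : String × String) (he : e ∈ es) :
    e.1 ∈ btmKeys es := by
  have : e.1 ∈ es.map (fun e => e.1) := List.mem_map_of_mem he
  simpa [btmKeys, PySem.List.dedup] using (PySem.Set.mem_ofList _ _).mpr this

theorem btm_mem_canon (es : List (String × String)) (y : String × String)
    (hy : y ∈ btmCanon es) : y ∈ es ∧ y.1 ∈ btmKeys es := by
  obtain ⟨k, _, hf⟩ := List.mem_flatMap.mp hy
  have hmf := List.mem_filter.mp hf
  exact ⟨hmf.1, btm_mem_keys es y hmf.1⟩

-- ---- appending one pair to the canonical form ----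
theorem btm_filt_append_single (es : List (String × String)) (e : String × String) (k : String) :
    btmFilt (es ++ [e]) k = btmFilt es k ++ (if e.1 = k then [e] else []) := by
  simp only [btmFilt, List.filter_append]
  congr 1
  by_cases h : e.1 = k
  · simp [List.filter, h]
  · have hbe : (e.1 == k) = false := by simp [h]
    simp [List.filter, hbe, h]

theorem btm_filt_nil_of_not_mem (es : List (String × String)) (k : String)
    (h : k ∉ btmKeys es) : btmFilt es k = [] := by
  rw [btmFilt, List.filter_eq_nil_iff]
  intro e he
  intro hbe
  exact h (by rw [← show e.1 = k by simpa using hbe]; exact btm_mem_keys es e he)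

theorem btm_keys_append_single (es : List (String × String)) (e : String × String) :
    btmKeys (es ++ [e]) = PySem.Set.add (btmKeys es) e.1 := by
  simp [btmKeys, PySem.List.dedup, PySem.Set.ofList, List.foldl_append]

theorem btm_canon_append_new (es : List (String × String)) (e : String × String)
    (h : e.1 ∉ btmKeys es) : btmCanon (es ++ [e]) = btmCanon es ++ [e] := by
  rw [btmCanon, btm_keys_append_single, PySem.Set.add_of_not_mem h, List.flatMap_append]
  have h2 : ∀ k ∈ btmKeys es, btmFilt (es ++ [e]) k = btmFilt es k := by
    intro k hk
    rw [btm_filt_append_single]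
    have : e.1 ≠ k := fun hh => h (hh ▸ hk)
    simp [this]
  rw [List.flatMap_congr h2]
  rw [show ([e.1] : List String).flatMap (btmFilt (es ++ [e])) = btmFilt (es ++ [e]) e.1 by simp]
  rw [btm_filt_append_single, btm_filt_nil_of_not_mem es e.1 h]
  simp [btmCanon]

theorem btm_canon_append_old (es : List (String × String)) (e : String × String)
    (ks1 ks2 : List String) (hks : btmKeys es = ks1 ++ e.1 :: ks2) :
    btmCanon (es ++ [e]) =
      ks1.flatMap (btmFilt es) ++ (btmFilt es e.1 ++ [e]) ++ ks2.flatMap (btmFilt es) := by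
  have hmem : e.1 ∈ btmKeys es := by rw [hks]; simp
  have hnd : (btmKeys es).Nodup := by
    simpa [btmKeys, PySem.List.dedup] using PySem.Set.nodup_ofList (es.map (fun e => e.1))
  rw [hks] at hnd
  have hnotks1 : e.1 ∉ ks1 := by
    intro hx
    exact (List.disjoint_of_nodup_append hnd) hx (by simp)
  have hnotks2 : e.1 ∉ ks2 := by
    have := (List.nodup_append.mp hnd).2.1
    exact (List.nodup_cons.mp this).1
  rw [btmCanon, btm_keys_append_single, PySem.Set.add_of_mem hmem, hks,
    List.flatMap_append, List.flatMap_cons]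
  have hf1 : ∀ k ∈ ks1, btmFilt (es ++ [e]) k = btmFilt es k := by
    intro k hk
    rw [btm_filt_append_single]
    have : e.1 ≠ k := fun hh => hnotks1 (hh ▸ hk)
    simp [this]
  have hf2 : ∀ k ∈ ks2, btmFilt (es ++ [e]) k = btmFilt es k := by
    intro k hk
    rw [btm_filt_append_single]
    have : e.1 ≠ k := fun hh => hnotks2 (hh ▸ hk)
    simp [this]
  rw [List.flatMap_congr hf1, List.flatMap_congr hf2, btm_filt_append_single]
  simp

-- ---- the insertion step preserves the canonical form ----
theorem btm_step (pairs es ys : List (String × String)) (e : String × String)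
    (hp : pairs = es ++ e :: ys) :
    PySem.List.insertBy
      (fun a b => decide ((btmB_rank pairs).getD a.1 0 < (btmB_rank pairs).getD b.1 0)) e
      (btmCanon es) = btmCanon (es ++ [e]) := by
  obtain ⟨t, hdd, hdisj⟩ := by
    have := btm_keys_append es (e :: ys)
    rwa [← hp] at this
  have he_dd : e.1 ∈ btmKeys pairs := btm_mem_keys pairs e (by rw [hp]; simp)
  have hrank := btm_rank_getD pairs
  -- ranks of keys of the prefix are their index inside btmKeys es
  have hidx_prefix : ∀ k ∈ btmKeys es, List.idxOf k (btmKeys pairs) = List.idxOf k (btmKeys es) := by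
    intro k hk
    rw [hdd, List.idxOf_append]
    simp [hk]
  have hsub : ∀ k ∈ btmKeys es, k ∈ btmKeys pairs := by
    intro k hk; rw [hdd]; exact List.mem_append_left _ hk
  by_cases hcase : e.1 ∈ btmKeys es
  · -- existing key: insert at the end of its group
    obtain ⟨ks1, ks2, hks⟩ := List.append_of_mem hcase
    have hnd : (btmKeys es).Nodup := by
      simpa [btmKeys, PySem.List.dedup] using PySem.Set.nodup_ofList (es.map (fun e => e.1))
    have hnd' := hks ▸ hnd
    have hnotks1 : e.1 ∉ ks1 := fun hx => (List.disjoint_of_nodup_append hnd') hx (by simp)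
    have hnotks2 : e.1 ∉ ks2 :=
      (List.nodup_cons.mp (List.nodup_append.mp hnd').2.1).1
    have hidx_e : List.idxOf e.1 (btmKeys es) = ks1.length := by
      rw [hks, List.idxOf_append]
      simp [hnotks1, List.idxOf_cons_self]
    -- decompose the canonical form
    have hcanon : btmCanon es =
        (ks1.flatMap (btmFilt es) ++ btmFilt es e.1) ++ ks2.flatMap (btmFilt es) := by
      rw [btmCanon, hks, List.flatMap_append, List.flatMap_cons]
      simp [List.append_assoc]
    rw [hcanon]
    have hskip : ∀ y ∈ ks1.flatMap (btmFilt es) ++ btmFilt es e.1,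
        (decide ((btmB_rank pairs).getD e.1 0 < (btmB_rank pairs).getD y.1 0)) = false := by
      intro y hy
      rcases List.mem_append.mp hy with hy1 | hy2
      · obtain ⟨k, hkk, hyf⟩ := List.mem_flatMap.mp hy1
        have hy1k : y.1 = k := by simpa [btmFilt] using (List.mem_filter.mp hyf).2
        have hkmem : k ∈ btmKeys es := by rw [hks]; exact List.mem_append_left _ hkk
        have hidxk : List.idxOf k (btmKeys es) < ks1.length := by
          rw [hks, List.idxOf_append]
          simp only [hkk, if_pos]
          exact List.idxOf_lt_length_of_mem hkk
        rw [hrank e.1 he_dd, hrank y.1 (hy1k ▸ hsub k hkmem),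
          hy1k, hidx_prefix k hkmem, hidx_prefix e.1 hcase, hidx_e]
        simp only [decide_eq_false_iff_not, not_lt]
        exact_mod_cast Nat.le_of_lt hidxk
      · have hy1k : y.1 = e.1 := by simpa [btmFilt] using (List.mem_filter.mp hy2).2
        rw [hy1k]
        simp
    have hfront : ∀ y ∈ ks2.flatMap (btmFilt es),
        (decide ((btmB_rank pairs).getD e.1 0 < (btmB_rank pairs).getD y.1 0)) = true := by
      intro y hy
      obtain ⟨k, hkk, hyf⟩ := List.mem_flatMap.mp hy
      have hy1k : y.1 = k := by simpa [btmFilt] using (List.mem_filter.mp hyf).2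
      have hkmem : k ∈ btmKeys es := by rw [hks]; exact List.mem_append_right _ (by simp [hkk])
      have hkne : k ≠ e.1 := fun hh => hnotks2 (hh ▸ hkk)
      have hknotks1 : k ∉ ks1 := fun hx =>
        (List.disjoint_of_nodup_append hnd') hx (by simp [hkk])
      have hidxk : ks1.length < List.idxOf k (btmKeys es) := by
        rw [hks, List.idxOf_append]
        simp only [hknotks1, if_false]
        have hbe : (e.1 == k) = false := by simp [Ne.symm hkne]
        have : List.idxOf k (e.1 :: ks2) = List.idxOf k ks2 + 1 := by
          simp [List.idxOf_cons, hbe]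
        omega
      rw [hrank e.1 he_dd, hrank y.1 (hy1k ▸ hsub k hkmem),
        hy1k, hidx_prefix k hkmem, hidx_prefix e.1 hcase, hidx_e]
      simp only [decide_eq_true_eq]
      exact_mod_cast hidxk
    rw [btm_insertBy_skip _ _ _ _ hskip, btm_insertBy_front _ _ _ hfront,
      btm_canon_append_old es e ks1 ks2 hks]
    simp [List.append_assoc]
  · -- new key: append at the very end
    have hall : ∀ y ∈ btmCanon es,
        (decide ((btmB_rank pairs).getD e.1 0 < (btmB_rank pairs).getD y.1 0)) = false := by
      intro y hy
      obtain ⟨hyes, hykeys⟩ := btm_mem_canon es y hy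
      have hylt : List.idxOf y.1 (btmKeys es) < (btmKeys es).length :=
        List.idxOf_lt_length_of_mem hykeys
      have hidx_y : List.idxOf y.1 (btmKeys pairs) = List.idxOf y.1 (btmKeys es) :=
        hidx_prefix y.1 hykeys
      have hidx_e : (btmKeys es).length ≤ List.idxOf e.1 (btmKeys pairs) := by
        rw [hdd, List.idxOf_append]
        simp [hcase]
      rw [hrank e.1 he_dd, hrank y.1 (hsub y.1 hykeys), hidx_y]
      simp only [decide_eq_false_iff_not, not_lt]
      have : List.idxOf y.1 (btmKeys es) < List.idxOf e.1 (btmKeys pairs) := by omega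
      exact_mod_cast Nat.le_of_lt this
    rw [PySem.List.insertBy_of_forall_not_before _ _ _ hall, btm_canon_append_new es e hcase]

-- ---- stable sort by first-occurrence rank is exactly the canonical form ----
theorem btm_sorted_canon (pairs : List (String × String)) :
    PySem.List.sorted pairs (fun e => (btmB_rank pairs).getD e.1 0) false = btmCanon pairs := by
  rw [PySem.List.sorted_eq_foldl_insertBy]
  have hmain : ∀ ys es, pairs = es ++ ys →
      ys.foldl (fun acc x => PySem.List.insertBy
        (fun a b => decide ((btmB_rank pairs).getD a.1 0 < (btmB_rank pairs).getD b.1 0)) x acc)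
        (btmCanon es) = btmCanon pairs := by
    intro ys
    induction ys with
    | nil => intro es h; rw [List.foldl_nil]; rw [h, List.append_nil]
    | cons y ys ih =>
      intro es hp
      rw [List.foldl_cons, btm_step pairs es ys y hp, ih (es ++ [y]) (by simp [hp])]
  have h0 := hmain pairs [] (by simp)
  have hc0 : btmCanon ([] : List (String × String)) = [] := by
    simp [btmCanon, btmKeys, PySem.List.dedup, PySem.Set.ofList, PySem.Set.empty]
  rw [hc0] at h0
  exact h0

-- ---- grouped = canonical group-by map ----
theorem btm_grouped_eq (pairs : List (String × String)) :
    btmB_grouped pairs =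
      (btmKeys pairs).map (fun k => (k, PySem.Set.ofList ((btmFilt pairs k).map (fun e => e.2)))) := by
  rw [btmB_grouped, btm_sorted_canon, btmCanon]
  have hnd : (btmKeys pairs).Nodup := by
    simpa [btmKeys, PySem.List.dedup] using PySem.Set.nodup_ofList (pairs.map (fun e => e.1))
  rw [btm_runs_flatMap pairs (btmKeys pairs) hnd (by
    intro k hk
    have h2 := hk
    simp only [btmKeys, PySem.List.dedup] at h2
    rw [PySem.Set.mem_ofList] at h2
    obtain ⟨e, he, hek⟩ := List.mem_map.mp h2
    exact List.ne_nil_of_mem (List.mem_filter.mpr ⟨he, by simp [hek]⟩))]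
  simp [List.map_map, Function.comp_def]

-- ===== VERDICT (by name: the statement is the Claim_ definition above) =====
theorem build_tone_modifier_mappings_spec : Claim_equal_build_tone_modifier_mappings := by
  intro phrases kt km _
  unfold Spec_build_tone_modifier_mappings build_tone_modifier_mappings build_tone_modifier_mappings_alt
  rw [btmA_fold_flat]
  dsimp only
  rw [btm_swap_fold, btm_items_fold, btm_items_fold, ← btm_grouped_eq, ← btm_grouped_eq]
  simp [PySem.Set.update, PySem.Set.ofList, PySem.Set.empty]
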